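-- pv_equiv track=rewrite | github.com/trueagi-io/MORK | python/blow-stack.py | space_query_fatality_combo
-- ===== SOURCE A (Python) =====
-- def space_query_fatality_combo(depth, width):
--     def rec(d, i, buf, last):
--         if d == depth:
--             buf += f"$y" if last else f"v{d}_{i}"
--         else:
--             buf += "("
--             for i in range(width):
--                 if i != 0: buf += " "
--                 rec(d + 1, i, buf, last and (i == (width - 1)))
--             buf += ")"
--
--     space_e, query_e = [], []
--     rec(0, 1, space_e, False)
--     rec(0, 1, query_e, True)
--     return f"(X {''.join(space_e)})", f"($x {''.join(query_e)})"
-- ===== SOURCE B (Python) =====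
-- def space_query_fatality_combo(depth, width):
--     # bottom-up: all subtrees at a level are identical, so build one leaf-level
--     # node and wrap it depth-1 times; keep a parallel 'special' chain for $y
--     if depth == 0:
--         space, query = "v0_1", "$y"
--     elif width <= 0:
--         # no children at any level: the whole tree collapses to a single '()'
--         space, query = "()", "()"
--     else:
--         normal = "(" + " ".join(f"v{depth}_{j}" for j in range(width)) + ")"
--         special = "(" + " ".join([f"v{depth}_{j}" for j in range(width - 1)] + ["$y"]) + ")"
--         for _ in range(depth - 1):
--             special = "(" + " ".join([normal] * (width - 1) + [special]) + ")"
--             normal = "(" + " ".join([normal] * width) + ")"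
--         space, query = normal, special
--     return f"(X {space})", f"($x {query})"
-- ===== Notes on version B (the rewrite author's own statement) =====
-- stated objective: alternative
-- what changed: B builds the nested expression bottom-up, constructing the leaf-level node once and iteratively wrapping one shared 'normal' subtree (and a parallel 'special' subtree carrying $y) per level with str.join, instead of A's top-down recursion that visits every one of the width^depth leaves and appends characters to a shared buffer.
import Mathlib
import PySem

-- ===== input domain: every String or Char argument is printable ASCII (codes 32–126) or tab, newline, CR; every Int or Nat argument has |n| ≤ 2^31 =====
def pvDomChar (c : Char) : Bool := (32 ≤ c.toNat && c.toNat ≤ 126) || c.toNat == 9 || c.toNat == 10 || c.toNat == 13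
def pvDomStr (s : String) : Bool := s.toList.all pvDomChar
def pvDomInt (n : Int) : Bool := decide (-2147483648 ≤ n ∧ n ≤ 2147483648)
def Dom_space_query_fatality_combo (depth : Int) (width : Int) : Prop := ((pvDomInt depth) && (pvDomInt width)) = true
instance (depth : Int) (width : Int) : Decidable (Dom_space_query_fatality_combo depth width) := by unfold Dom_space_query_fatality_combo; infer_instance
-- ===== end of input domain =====

-- B builds the nested string bottom-up by wrapping one shared subtree per level
-- (all subtrees of a level are identical) instead of A's top-down per-leaf
-- recursion over a character buffer; objective: alternative decomposition.


-- ===== PORT A =====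
-- rec(d, i, buf, last), with Python's own 'd == depth' test; the fuel argument
-- is only a termination guard (on Pre_ it never runs out: the fuel-0 branch is
-- reached exactly where the Python recurses without bound and raises).
def pvRecA (depth width : Int) : Nat → Int → Int → String → Bool → String
  | 0, d, i, buf, last =>
    if d == depth then
      buf ++ (if last then "$y" else "v" ++ PySem.Int.toStr d ++ "_" ++ PySem.Int.toStr i)
    else buf
  | n+1, d, i, buf, last =>
    if d == depth then
      buf ++ (if last then "$y" else "v" ++ PySem.Int.toStr d ++ "_" ++ PySem.Int.toStr i)
    else
      let buf := buf ++ "("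
      let buf := (PySem.List.pyRange 0 width 1).foldl
        (fun b i =>
          let b := if i ≠ 0 then b ++ " " else b
          pvRecA depth width n (d + 1) i b (last && (i == width - 1))) buf
      buf ++ ")"

def space_query_fatality_combo (depth : Int) (width : Int) : String × String :=
  let space_e := pvRecA depth width (depth.toNat + 1) 0 1 "" false
  let query_e := pvRecA depth width (depth.toNat + 1) 0 1 "" true
  ("(X " ++ space_e ++ ")", "($x " ++ query_e ++ ")")

-- ===== PORT B =====
def pvLeaf (depth j : Int) : String := "v" ++ PySem.Int.toStr depth ++ "_" ++ PySem.Int.toStr j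

def space_query_fatality_combo_alt (depth : Int) (width : Int) : String × String :=
  let sq : String × String :=
    if depth == 0 then ("v0_1", "$y")
    else if width ≤ 0 then ("()", "()")
    else
      let normal := "(" ++ PySem.Str.join " " ((PySem.List.pyRange 0 width 1).map (pvLeaf depth)) ++ ")"
      let special := "(" ++ PySem.Str.join " " (((PySem.List.pyRange 0 (width - 1) 1).map (pvLeaf depth)) ++ ["$y"]) ++ ")"
      (List.range (depth - 1).toNat).foldl
        (fun (p : String × String) _ =>
          let special := "(" ++ PySem.Str.join " " (List.replicate (width - 1).toNat p.1 ++ [p.2]) ++ ")"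
          let normal := "(" ++ PySem.Str.join " " (List.replicate width.toNat p.1) ++ ")"
          (normal, special)) (normal, special)
  ("(X " ++ sq.1 ++ ")", "($x " ++ sq.2 ++ ")")

-- ===== PRECONDITION & SPEC =====
-- Pre_ excludes depth < 0 together with width > 0, exactly the inputs on which
-- the Python A recurses without bound and raises RecursionError (no input it
-- returns on is excluded).
def Pre_space_query_fatality_combo (depth : Int) (width : Int) : Prop := 0 ≤ depth ∨ width ≤ 0
instance (depth : Int) (width : Int) : Decidable (Pre_space_query_fatality_combo depth width) := by unfold Pre_space_query_fatality_combo; infer_instance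
def pvWitness_space_query_fatality_combo : Int × Int := (2, 2)

def Spec_space_query_fatality_combo (depth : Int) (width : Int) (out : String × String) : Prop := out = space_query_fatality_combo_alt depth width
instance (depth : Int) (width : Int) (out : String × String) : Decidable (Spec_space_query_fatality_combo depth width out) := by unfold Spec_space_query_fatality_combo; infer_instance

-- ===== CLAIM (what is proved, stated in full; the proofs are below) =====
def Claim_equal_space_query_fatality_combo : Prop := ∀ (depth : Int) (width : Int), Dom_space_query_fatality_combo depth width → Pre_space_query_fatality_combo depth width → Spec_space_query_fatality_combo depth width (space_query_fatality_combo depth width)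

-- ===== LEMMAS AND PROOFS =====

-- the separated concatenation "g 0 ⟨sp⟩ g 1 ⟨sp⟩ … ⟨sp⟩ g (k-1)" that both the
-- A-side fold and the B-side joins produce
def pvCat (g : Int → String) : Nat → String
  | 0 => ""
  | k+1 => if k = 0 then g 0 else pvCat g k ++ " " ++ g (k : Int)

-- the subtree of A's rec at fuel n (levels remaining), flag last, parent index i
def pvT (depth width : Int) : Nat → Bool → Int → String
  | 0, last, i => if last then "$y" else "v" ++ PySem.Int.toStr depth ++ "_" ++ PySem.Int.toStr i
  | n+1, last, _ => "(" ++ pvCat (fun j => pvT depth width n (last && (j == width - 1)) j) width.toNat ++ ")"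

lemma sjoin_cons_cons (s a b : String) (l : List String) :
    PySem.Str.join s (a :: b :: l) = a ++ s ++ PySem.Str.join s (b :: l) := by
  simp [PySem.Str.join, PySem.Chars.join_cons_cons]; exact Eq.symm String.append_assoc

lemma sjoin_singleton (s a : String) : PySem.Str.join s [a] = a := by
  simp [PySem.Str.join, PySem.Chars.join_singleton]

lemma sjoin_append_singleton (l : List String) (x : String) :
    PySem.Str.join " " (l ++ [x]) = if l = [] then x else PySem.Str.join " " l ++ " " ++ x := by
  induction l with
  | nil => simp [sjoin_singleton]
  | cons a l ih =>
    cases l with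
    | nil => simp [sjoin_cons_cons, sjoin_singleton]
    | cons b l' =>
      simp only [List.cons_append, sjoin_cons_cons]
      rw [← List.cons_append, ih]
      simp [String.append_assoc]

lemma joinCat (g : Int → String) (k : Nat) :
    PySem.Str.join " " ((List.range k).map (fun m : Nat => g (m : Int))) = pvCat g k := by
  induction k with
  | zero => rfl
  | succ k ih =>
    rw [List.range_succ, List.map_append]
    simp only [List.map_cons, List.map_nil, sjoin_append_singleton, ih]
    rcases Nat.eq_zero_or_pos k with h | h
    · subst h; simp [pvCat]
    · have : (List.range k).map (fun m : Nat => g (m : Int)) ≠ [] := by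
        apply List.ne_nil_of_length_pos; simpa using h
      simp [pvCat, this, Nat.pos_iff_ne_zero.mp h]

lemma catCongr (g g' : Int → String) (k : Nat) (h : ∀ m : Nat, m < k → g m = g' m) :
    pvCat g k = pvCat g' k := by
  induction k with
  | zero => rfl
  | succ k ih =>
    simp only [pvCat, ih (fun m hm => h m (by omega))]
    rcases Nat.eq_zero_or_pos k with h0 | h0
    · subst h0
      have := h 0 (by omega)
      simp at this
      simp [this]
    · simp [Nat.pos_iff_ne_zero.mp h0, h k (by omega)]

lemma foldA (g : Int → String) (k : Nat) : ∀ buf : String,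
    (List.range k).foldl (fun (b : String) (m : Nat) => (if (m : Int) ≠ 0 then b ++ " " else b) ++ g (m : Int)) buf
      = buf ++ pvCat g k := by
  induction k with
  | zero => intro buf; simp [pvCat]
  | succ k ih =>
    intro buf
    rw [List.range_succ, List.foldl_append, ih]
    rcases Nat.eq_zero_or_pos k with h | h
    · subst h; simp [pvCat]
    ·       simp [pvCat, Nat.pos_iff_ne_zero.mp h, String.append_assoc]

lemma recA_T (depth width : Int) : ∀ (n : Nat) (d i : Int) (buf : String) (last : Bool),
    d = depth - n →
    pvRecA depth width (n + 1) d i buf last = buf ++ pvT depth width n last i := by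
  intro n
  induction n with
  | zero =>
    intro d i buf last hd
    simp only [Int.natCast_zero, sub_zero] at hd
    subst hd
    simp [pvRecA, pvT]
  | succ n ih =>
    intro d i buf last hd
    have hb : ∀ (b : String) (j : Int),
        pvRecA depth width (n + 1) (d + 1) j (if j ≠ 0 then b ++ " " else b) (last && (j == width - 1))
          = (if j ≠ 0 then b ++ " " else b) ++ pvT depth width n (last && (j == width - 1)) j := by
      intro b j
      exact ih (d + 1) j _ _ (by push_cast at hd ⊢; omega)
    have hne : (d == depth) = false := by
      have : d ≠ depth := by push_cast at hd; omega
      simp [this]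
    show (if (d == depth) = true then _ else _) = _
    simp only [hne, Bool.false_eq_true, if_false]
    rw [show ((PySem.List.pyRange 0 width 1).foldl
          (fun b i =>
            pvRecA depth width (n + 1) (d + 1) i (if i ≠ 0 then b ++ " " else b) (last && (i == width - 1)))
          (buf ++ "("))
        = ((PySem.List.pyRange 0 width 1).foldl
          (fun b i => (if i ≠ 0 then b ++ " " else b) ++ pvT depth width n (last && (i == width - 1)) i)
          (buf ++ "(")) from PySem.List.foldl_congr_mem _ _ _ _ (fun b j _ => hb b j)]
    rw [PySem.List.pyRange_one, List.foldl_map]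
    simp only [sub_zero, zero_add]
    rw [foldA (fun j => pvT depth width n (last && (j == width - 1)) j) width.toNat (buf ++ "(")]
    simp [pvT, String.append_assoc]

-- the B-side building blocks equal pvT at the matching level
lemma replicate_cat (s : String) (k : Nat) :
    PySem.Str.join " " (List.replicate k s) = pvCat (fun _ => s) k := by
  rw [← joinCat (fun _ => s) k]
  congr 1
  simp [List.map_const']

lemma T_degenerate (depth width : Int) (hw : width ≤ 0) (n : Nat) (last : Bool) (i : Int) :
    pvT depth width (n + 1) last i = "()" := by
  have : width.toNat = 0 := by omega
  simp [pvT, this, pvCat]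

lemma N_level1 (depth width : Int) (i : Int) :
    "(" ++ PySem.Str.join " " ((PySem.List.pyRange 0 width 1).map (pvLeaf depth)) ++ ")"
      = pvT depth width 1 false i := by
  rw [PySem.List.pyRange_one, List.map_map]
  simp only [sub_zero, zero_add]
  rw [show (pvLeaf depth ∘ fun k : Nat => (k : Int)) = fun m : Nat => pvLeaf depth (m : Int) from rfl]
  rw [joinCat (pvLeaf depth) width.toNat]
  have hc := catCongr (fun j => pvT depth width 0 false j) (pvLeaf depth) width.toNat
    (fun m _ => by simp [pvT, pvLeaf])
  simp only [pvT, Bool.false_and] at hc ⊢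
  rw [hc]

lemma Q_level1 (depth width : Int) (hw : 0 < width) (i : Int) :
    "(" ++ PySem.Str.join " " (((PySem.List.pyRange 0 (width - 1) 1).map (pvLeaf depth)) ++ ["$y"]) ++ ")"
      = pvT depth width 1 true i := by
  obtain ⟨m, hm⟩ : ∃ m : Nat, width.toNat = m + 1 := ⟨width.toNat - 1, by omega⟩
  have hm1 : (width - 1).toNat = m := by omega
  rw [PySem.List.pyRange_one, List.map_map]
  simp only [sub_zero, zero_add]
  rw [show (pvLeaf depth ∘ fun k : Nat => (k : Int)) = fun mm : Nat => pvLeaf depth (mm : Int) from rfl]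
  rw [sjoin_append_singleton, hm1]
  simp only [pvT, Bool.true_and, hm]
  rcases Nat.eq_zero_or_pos m with h0 | hpos
  · subst h0
    have : ((0 : Int) == width - 1) = true := by
      have : width = 1 := by omega
      simp [this]
    simp [pvCat, this]
  · have hne : (List.range m).map (fun mm : Nat => pvLeaf depth (mm : Int)) ≠ [] := by
      apply List.ne_nil_of_length_pos; simpa using hpos
    rw [if_neg hne, joinCat (pvLeaf depth) m]
    have hlast : ((m : Int) == width - 1) = true := by
      have : (m : Int) = width - 1 := by omega
      simp [this]
    have hc := catCongr (fun j => pvT depth width 0 (j == width - 1) j) (pvLeaf depth) m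
      (fun mm hmm => by
        have hf : ((mm : Int) == width - 1) = false := by
          have : (mm : Int) ≠ width - 1 := by omega
          simp [this]
        simp [pvT, hf, pvLeaf])
    simp only [pvCat, Nat.pos_iff_ne_zero.mp hpos, if_false, hlast, pvT, if_true] at hc ⊢
    rw [hc]

lemma T_wrap_false (depth width : Int) (n : Nat) (i i' : Int) :
    pvT depth width (n + 2) false i
      = "(" ++ PySem.Str.join " " (List.replicate width.toNat (pvT depth width (n + 1) false i')) ++ ")" := by
  rw [replicate_cat]
  show "(" ++ pvCat (fun j => pvT depth width (n+1) (false && (j == width - 1)) j) width.toNat ++ ")" = _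
  rw [catCongr _ (fun _ => pvT depth width (n + 1) false i') width.toNat (fun m _ => by simp only [Bool.false_and]; rfl)]

lemma T_wrap_true (depth width : Int) (hw : 0 < width) (n : Nat) (i i' i'' : Int) :
    pvT depth width (n + 2) true i
      = "(" ++ PySem.Str.join " "
          (List.replicate (width - 1).toNat (pvT depth width (n + 1) false i')
            ++ [pvT depth width (n + 1) true i'']) ++ ")" := by
  obtain ⟨m, hm⟩ : ∃ m : Nat, width.toNat = m + 1 := ⟨width.toNat - 1, by omega⟩
  have hm1 : (width - 1).toNat = m := by omega
  rw [hm1, sjoin_append_singleton]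
  show "(" ++ pvCat (fun j => pvT depth width (n+1) (true && (j == width - 1)) j) width.toNat ++ ")" = _
  simp only [Bool.true_and, hm]
  rcases Nat.eq_zero_or_pos m with h0 | hpos
  · subst h0
    have h1 : ((0 : Int) == width - 1) = true := by
      have : width = 1 := by omega
      simp [this]
    simp only [pvCat, h1, List.replicate_zero]
    rfl
  · have hne : List.replicate m (pvT depth width (n + 1) false i') ≠ [] := by
      simp; omega
    rw [if_neg hne, replicate_cat]
    have hlast : ((m : Int) == width - 1) = true := by
      have : (m : Int) = width - 1 := by omega
      simp [this]
    simp only [pvCat, Nat.pos_iff_ne_zero.mp hpos, if_false, hlast]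
    rw [catCongr (fun j => pvT depth width (n+1) ((j == width - 1)) j)
      (fun _ => pvT depth width (n + 1) false i') m
      (fun mm hmm => by
        have : ((mm : Int) == width - 1) = false := by
          have : (mm : Int) ≠ width - 1 := by omega
          simp [this]
        simp only [this]; rfl)]
    rfl

lemma loopB (depth width : Int) (hw : 0 < width) : ∀ m : Nat,
    (List.range m).foldl
      (fun (p : String × String) _ =>
        (("(" ++ PySem.Str.join " " (List.replicate width.toNat p.1) ++ ")"),
         ("(" ++ PySem.Str.join " " (List.replicate (width - 1).toNat p.1 ++ [p.2]) ++ ")")))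
      (pvT depth width 1 false 0, pvT depth width 1 true 0)
      = (pvT depth width (m + 1) false 0, pvT depth width (m + 1) true 0) := by
  intro m
  induction m with
  | zero => rfl
  | succ m ih =>
    rw [List.range_succ, List.foldl_append, ih]
    simp only [List.foldl_cons, List.foldl_nil, Prod.mk.injEq]
    exact ⟨(T_wrap_false depth width m 0 0).symm, (T_wrap_true depth width hw m 0 0 0).symm⟩

theorem pv_main (depth width : Int) (hpre : 0 ≤ depth ∨ width ≤ 0) :
    space_query_fatality_combo depth width = space_query_fatality_combo_alt depth width := by
  by_cases hd : 0 ≤ depth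
  case neg =>
    have hw : width ≤ 0 := by rcases hpre with h | h <;> omega
    have ht : depth.toNat = 0 := by omega
    have hz : (depth == 0) = false := by simp; omega
    have hne : ((0 : Int) == depth) = false := by simp; omega
    have hnil : PySem.List.pyRange 0 width 1 = [] := PySem.List.pyRange_one_eq_nil (by omega)
    simp only [space_query_fatality_combo, space_query_fatality_combo_alt, ht, pvRecA, hne,
      Bool.false_eq_true, if_false, hnil, List.foldl_nil, hz, hw, if_true]
    decide
  case pos =>
  have hA : space_query_fatality_combo depth width
      = ("(X " ++ pvT depth width depth.toNat false 1 ++ ")",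
         "($x " ++ pvT depth width depth.toNat true 1 ++ ")") := by
    show ("(X " ++ pvRecA depth width (depth.toNat + 1) 0 1 "" false ++ ")",
          "($x " ++ pvRecA depth width (depth.toNat + 1) 0 1 "" true ++ ")") = _
    rw [recA_T depth width depth.toNat 0 1 "" false (by omega),
        recA_T depth width depth.toNat 0 1 "" true (by omega)]
    simp
  rw [hA]
  by_cases h0 : depth = 0
  · subst h0
    rfl
  · have hd1 : 1 ≤ depth := by omega
    obtain ⟨m, hm⟩ : ∃ m : Nat, depth.toNat = m + 1 := ⟨depth.toNat - 1, by omega⟩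
    have hm1 : (depth - 1).toNat = m := by omega
    simp only [space_query_fatality_combo_alt]
    have hz : (depth == 0) = false := by simp [h0]
    simp only [hz, Bool.false_eq_true, if_false, hm1]
    by_cases hw : 0 < width
    · have hwn : ¬ width ≤ 0 := by omega
      simp only [if_neg hwn]
      have hN : "(" ++ PySem.Str.join " " ((PySem.List.pyRange 0 width 1).map (pvLeaf depth)) ++ ")"
          = pvT depth width 1 false 0 := N_level1 depth width 0
      have hQ : "(" ++ PySem.Str.join " " (((PySem.List.pyRange 0 (width - 1) 1).map (pvLeaf depth)) ++ ["$y"]) ++ ")"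
          = pvT depth width 1 true 0 := Q_level1 depth width hw 0
      rw [hQ, hN, loopB depth width hw m, hm]
      rfl
    · have hwn : width ≤ 0 := by omega
      simp only [if_pos hwn]
      rw [hm, T_degenerate depth width hwn m false 1, T_degenerate depth width hwn m true 1]

-- ===== VERDICT (by name: the statement is the Claim_ definition above) =====
theorem space_query_fatality_combo_spec : Claim_equal_space_query_fatality_combo := by
  intro depth width _hdom hpre
  unfold Spec_space_query_fatality_combo
  unfold Pre_space_query_fatality_combo at hpre
  exact pv_main depth width hpre
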